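-- pv_equiv track=rewrite | github.com/pyd418/fusse | split_dataset.py | get_fact_dic
-- ===== SOURCE A (Python) =====
-- def get_fact_dic(facts_all, Pts):
--     # Save for the predicates in Pt_list.
--     # fact_dic: key: P_index, value: [all_fact_list].
--     facts_dic = {}
--     for ff in facts_all:
--         if ff[2] in Pts:
--             if ff[2] in facts_dic.keys():
--                 temp_list = facts_dic.get(ff[2])
--             else:
--                 temp_list = []
--             temp_list.append([ff[0], ff[1]])
--             facts_dic[ff[2]] = temp_list
--     return facts_dic
-- ===== SOURCE B (Python) =====
-- def get_fact_dic(facts_all, Pts):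
--     # Two-pass: ordered distinct predicates first, then one comprehension per predicate.
--     keys = dict.fromkeys(ff[2] for ff in facts_all if ff[2] in Pts)
--     return {p: [[ff[0], ff[1]] for ff in facts_all if ff[2] == p] for p in keys}
-- ===== Notes on version B (the rewrite author's own statement) =====
-- stated objective: alternative
-- what changed: A builds the dict in a single pass over facts_all, accumulating and reinserting a growing list per predicate; B first computes the ordered distinct matching predicates with dict.fromkeys and then builds each group with one filter/map comprehension over facts_all per predicate.
import Mathlib
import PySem

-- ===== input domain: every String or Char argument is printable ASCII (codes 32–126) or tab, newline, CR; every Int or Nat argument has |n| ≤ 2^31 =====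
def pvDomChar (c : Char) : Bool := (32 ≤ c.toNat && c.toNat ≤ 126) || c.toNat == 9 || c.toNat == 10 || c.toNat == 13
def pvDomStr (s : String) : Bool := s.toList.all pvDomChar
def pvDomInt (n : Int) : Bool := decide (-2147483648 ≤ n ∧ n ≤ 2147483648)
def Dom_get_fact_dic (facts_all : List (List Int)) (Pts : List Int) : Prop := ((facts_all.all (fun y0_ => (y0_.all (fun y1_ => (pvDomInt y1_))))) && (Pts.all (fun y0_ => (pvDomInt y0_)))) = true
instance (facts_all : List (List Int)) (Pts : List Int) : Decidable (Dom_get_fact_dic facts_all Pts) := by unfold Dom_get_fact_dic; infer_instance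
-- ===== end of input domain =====

-- B replaces A's single-pass dict-accumulation by an ordered-distinct-key pass plus one
-- filter/map comprehension per predicate (same result, different decomposition; not faster).


-- ===== PORT A =====
-- literal transliteration of A: one pass over facts_all, accumulating a dict of groups
def get_fact_dic (facts_all : List (List Int)) (Pts : List Int) : List (Int × List (List Int)) :=
  (facts_all.foldl
    (fun (d : PySem.Dict Int (List (List Int))) ff =>
      if Pts.contains (PySem.List.pyGetD ff 2 0) then
        let temp_list :=
          if d.contains (PySem.List.pyGetD ff 2 0) then d.getD (PySem.List.pyGetD ff 2 0) []
          else []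
        d.insert (PySem.List.pyGetD ff 2 0)
          (temp_list ++ [[PySem.List.pyGetD ff 0 0, PySem.List.pyGetD ff 1 0]])
      else d)
    PySem.Dict.empty).items

-- ===== PORT B =====
-- B-side helpers: ff[2] and [ff[0], ff[1]]
def pvKey (ff : List Int) : Int := PySem.List.pyGetD ff 2 0
def pvVal (ff : List Int) : List Int := [PySem.List.pyGetD ff 0 0, PySem.List.pyGetD ff 1 0]

-- transliteration of B: dict.fromkeys over the matching predicates, then one comprehension per key
def get_fact_dic_alt (facts_all : List (List Int)) (Pts : List Int) : List (Int × List (List Int)) :=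
  let keys := PySem.List.dedup ((facts_all.filter (fun ff => Pts.contains (pvKey ff))).map pvKey)
  keys.map (fun p => (p, (facts_all.filter (fun ff => pvKey ff == p)).map pvVal))

-- ===== PRECONDITION & SPEC =====
-- Pre_ excludes exactly the inputs where Python A raises IndexError: a fact shorter than 3 entries.
def Pre_get_fact_dic (facts_all : List (List Int)) (Pts : List Int) : Prop :=
  ∀ ff ∈ facts_all, 3 ≤ ff.length
instance (facts_all : List (List Int)) (Pts : List Int) : Decidable (Pre_get_fact_dic facts_all Pts) := by unfold Pre_get_fact_dic; infer_instance
def pvWitness_get_fact_dic : List (List Int) × List Int := ([[1, 2, 5], [3, 4, 5], [0, 0, 7]], [5, 9])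

def Spec_get_fact_dic (facts_all : List (List Int)) (Pts : List Int) (out : List (Int × List (List Int))) : Prop := out = get_fact_dic_alt facts_all Pts
instance (facts_all : List (List Int)) (Pts : List Int) (out : List (Int × List (List Int))) : Decidable (Spec_get_fact_dic facts_all Pts out) := by unfold Spec_get_fact_dic; infer_instance

-- ===== CLAIM (what is proved, stated in full; the proofs are below) =====
def Claim_equal_get_fact_dic : Prop := ∀ (facts_all : List (List Int)) (Pts : List Int), Dom_get_fact_dic facts_all Pts → Pre_get_fact_dic facts_all Pts → Spec_get_fact_dic facts_all Pts (get_fact_dic facts_all Pts)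

-- ===== LEMMAS AND PROOFS =====

-- A's loop body is the grouping step `d.modify (pvKey ff) [] (· ++ [pvVal ff])`, guarded by membership
theorem pv_step_eq (Pts : List Int) :
    (fun (d : PySem.Dict Int (List (List Int))) ff =>
      if Pts.contains (PySem.List.pyGetD ff 2 0) then
        let temp_list :=
          if d.contains (PySem.List.pyGetD ff 2 0) then d.getD (PySem.List.pyGetD ff 2 0) []
          else []
        d.insert (PySem.List.pyGetD ff 2 0)
          (temp_list ++ [[PySem.List.pyGetD ff 0 0, PySem.List.pyGetD ff 1 0]])
      else d)
    = fun d ff => if Pts.contains (pvKey ff) then d.modify (pvKey ff) [] (· ++ [pvVal ff]) else d := by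
  funext d ff
  simp only [pvKey, pvVal]
  by_cases h : Pts.contains (PySem.List.pyGetD ff 2 0) = true
  · rw [if_pos h, if_pos h]
    by_cases hc : d.contains (PySem.List.pyGetD ff 2 0) = true
    · rw [if_pos hc]; rfl
    · rw [if_neg hc]
      conv_rhs =>
        rw [show d.modify (PySem.List.pyGetD ff 2 0) []
              (· ++ [[PySem.List.pyGetD ff 0 0, PySem.List.pyGetD ff 1 0]])
            = d.insert (PySem.List.pyGetD ff 2 0)
              (d.getD (PySem.List.pyGetD ff 2 0) []
                ++ [[PySem.List.pyGetD ff 0 0, PySem.List.pyGetD ff 1 0]]) from rfl,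
          PySem.Dict.getD_of_not_contains d ([] : List (List Int)) (by simpa using hc)]
  · rw [if_neg h, if_neg h]

-- the group of a key k that lies in Pts ignores the Pts-filter
theorem pv_filter_drop (facts_all : List (List Int)) (Pts : List Int) (k : Int)
    (hk : Pts.contains k = true) :
    (facts_all.filter (fun ff => Pts.contains (pvKey ff))).filter (fun ff => pvKey ff == k)
      = facts_all.filter (fun ff => pvKey ff == k) := by
  rw [List.filter_filter]
  apply List.filter_congr
  intro ff _
  have hk' : k ∈ Pts := by simpa using hk
  by_cases h : pvKey ff = k
  · simp [h, hk']
  · simp [h]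

-- ===== VERDICT (by name: the statement is the Claim_ definition above) =====
theorem get_fact_dic_spec : Claim_equal_get_fact_dic := by
  intro facts_all Pts _ _
  unfold Spec_get_fact_dic get_fact_dic get_fact_dic_alt
  rw [pv_step_eq, ← List.foldl_filter]
  set l := facts_all.filter (fun ff => Pts.contains (pvKey ff)) with hl
  have hnd : (l.foldl (fun d ff => d.modify (pvKey ff) [] (· ++ [pvVal ff]))
      PySem.Dict.empty).keys.Nodup :=
    PySem.Dict.nodup_keys_foldl_modify_key l pvKey [] (fun _ ff => (· ++ [pvVal ff]))
      PySem.Dict.empty PySem.Dict.nodup_keys_empty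
  rw [PySem.Dict.items_eq_map_keys _ hnd []]
  rw [PySem.Dict.keys_foldl_modify_key]
  have hkeys : PySem.Set.update (PySem.Dict.empty
      (κ := Int) (ν := List (List Int))).keys (l.map pvKey)
      = PySem.List.dedup (l.map pvKey) := rfl
  rw [hkeys]
  apply List.map_congr_left
  intro k hkmem
  have hkPts : Pts.contains k = true := by
    have : k ∈ l.map pvKey := (PySem.List.mem_dedup _ _).mp hkmem
    obtain ⟨ff, hff, hkey⟩ := List.mem_map.mp this
    have := List.mem_filter.mp hff
    rw [← hkey]; exact this.2
  have hgetD : (l.foldl (fun d ff => d.modify (pvKey ff) [] (· ++ [pvVal ff]))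
      PySem.Dict.empty).getD k []
      = (l.filter (fun ff => pvKey ff == k)).map pvVal := by
    have hmap : l.foldl (fun d ff => d.modify (pvKey ff) [] (· ++ [pvVal ff]))
        PySem.Dict.empty
        = (l.map (fun ff => (pvKey ff, pvVal ff))).foldl
            (fun d p => d.modify p.1 [] (· ++ [p.2])) PySem.Dict.empty := by
      rw [List.foldl_map]
    rw [hmap, PySem.Dict.getD_foldl_modify_append, List.filter_map, List.map_map]
    simp [Function.comp_def]
  rw [hgetD, pv_filter_drop facts_all Pts k hkPts]
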